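-- pv_equiv track=rewrite | github.com/Fraztahir/adsellix-audit | BACKUP_ppc_analysis_v1.0.0.py | parse_campaign_name
-- ===== SOURCE A (Python) =====
-- from typing import Dict, List, Tuple, Optional
--
-- def parse_campaign_name(campaign_name: str) -> Dict[str, str]:
--     """
--     Parse campaign naming convention to extract components.
--
--     Common patterns:
--     - "SP-Exact-keyword" -> {type: SP, match: Exact, target: keyword}
--     - "OG | Goal | Auto" -> {brand: OG, objective: Goal, targeting: Auto}
--     - "BS | Ball | Dribble" -> {brand: BS, product: Ball, target: Dribble}
--     """
--     result = {
--         'ad_type': '',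
--         'match_type': '',
--         'targeting': '',
--         'brand_code': '',
--         'objective': ''
--     }
--
--     name_lower = campaign_name.lower() if campaign_name else ''
--
--     # Detect ad type
--     if name_lower.startswith('sp-') or 'sponsored products' in name_lower:
--         result['ad_type'] = 'SP'
--     elif name_lower.startswith('sb-') or 'sponsored brands' in name_lower:
--         result['ad_type'] = 'SB'
--     elif name_lower.startswith('sd-') or 'sponsored display' in name_lower:
--         result['ad_type'] = 'SD'
--
--     # Detect match type
--     if 'exact' in name_lower:
--         result['match_type'] = 'Exact'
--     elif 'phrase' in name_lower:
--         result['match_type'] = 'Phrase'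
--     elif 'broad' in name_lower:
--         result['match_type'] = 'Broad'
--     elif 'auto' in name_lower:
--         result['targeting'] = 'Auto'
--     elif 'asin' in name_lower or 'product' in name_lower:
--         result['targeting'] = 'Product'
--
--     # Parse pipe-separated format
--     if '|' in campaign_name:
--         parts = [p.strip() for p in campaign_name.split('|')]
--         if len(parts) >= 2:
--             result['brand_code'] = parts[0]
--             result['objective'] = parts[1]
--
--     return result
-- ===== SOURCE B (Python) =====
-- RULES = [
--     ('ad', ['sp-'], ['sponsored products'], 'ad_type', 'SP'),
--     ('ad', ['sb-'], ['sponsored brands'], 'ad_type', 'SB'),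
--     ('ad', ['sd-'], ['sponsored display'], 'ad_type', 'SD'),
--     ('kw', [], ['exact'], 'match_type', 'Exact'),
--     ('kw', [], ['phrase'], 'match_type', 'Phrase'),
--     ('kw', [], ['broad'], 'match_type', 'Broad'),
--     ('kw', [], ['auto'], 'targeting', 'Auto'),
--     ('kw', [], ['asin', 'product'], 'targeting', 'Product'),
-- ]
--
--
-- def parse_campaign_name(campaign_name: str):
--     name_lower = campaign_name.lower() if campaign_name else ''
--
--     # Stage 1: collect ALL matching rules (no short-circuit).
--     matched = [(group, field, value)
--                for group, prefixes, substrings, field, value in RULES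
--                if any(name_lower.startswith(p) for p in prefixes)
--                or any(s in name_lower for s in substrings)]
--
--     # Stage 2: walk the matches back-to-front so the FIRST match per
--     # group survives the overwrites.
--     winners = {}
--     for group, field, value in reversed(matched):
--         winners[group] = (field, value)
--
--     fields = {'ad_type': '', 'match_type': '', 'targeting': '',
--               'brand_code': '', 'objective': ''}
--     for field, value in winners.values():
--         fields[field] = value
--
--     if '|' in campaign_name:
--         parts = [p.strip() for p in campaign_name.split('|')]
--         if len(parts) >= 2:
--             fields['brand_code'] = parts[0]
--             fields['objective'] = parts[1]
--
--     return fields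
-- ===== Notes on version B (the rewrite author's own statement) =====
-- stated objective: alternative
-- what changed: Instead of A's two mutually exclusive if/elif chains mutating a dict, B first collects ALL matching rules of one combined table (no short-circuit), then resolves priority by overwriting a per-group winners dict while walking the match list back-to-front, and finally writes the winners into the result fields.
import Mathlib
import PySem

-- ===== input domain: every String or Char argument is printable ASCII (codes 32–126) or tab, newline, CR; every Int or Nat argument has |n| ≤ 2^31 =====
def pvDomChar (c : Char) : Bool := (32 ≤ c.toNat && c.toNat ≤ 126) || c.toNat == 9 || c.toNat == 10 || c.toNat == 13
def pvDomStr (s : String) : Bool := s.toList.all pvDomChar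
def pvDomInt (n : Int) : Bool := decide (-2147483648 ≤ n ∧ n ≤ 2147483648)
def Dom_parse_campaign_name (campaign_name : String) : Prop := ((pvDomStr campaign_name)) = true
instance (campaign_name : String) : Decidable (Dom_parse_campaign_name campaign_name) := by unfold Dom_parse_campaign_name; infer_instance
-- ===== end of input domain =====

-- B replaces A's two if/elif chains by one collect-all-matches pass over a combined rule table
-- followed by a back-to-front overwrite that keeps the first match per group (alternative; same cost).

-- ===== PORT A =====
def parse_campaign_name (campaign_name : String) : List (String × String) :=
  let result : PySem.Dict String String := PySem.Dict.ofList
    [("ad_type", ""), ("match_type", ""), ("targeting", ""), ("brand_code", ""), ("objective", "")]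
  let name_lower := if campaign_name ≠ "" then PySem.Str.lower campaign_name else ""
  let result :=
    if PySem.Str.startswith name_lower "sp-" || PySem.Str.isIn "sponsored products" name_lower then
      result.insert "ad_type" "SP"
    else if PySem.Str.startswith name_lower "sb-" || PySem.Str.isIn "sponsored brands" name_lower then
      result.insert "ad_type" "SB"
    else if PySem.Str.startswith name_lower "sd-" || PySem.Str.isIn "sponsored display" name_lower then
      result.insert "ad_type" "SD"
    else result
  let result :=
    if PySem.Str.isIn "exact" name_lower then result.insert "match_type" "Exact"
    else if PySem.Str.isIn "phrase" name_lower then result.insert "match_type" "Phrase"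
    else if PySem.Str.isIn "broad" name_lower then result.insert "match_type" "Broad"
    else if PySem.Str.isIn "auto" name_lower then result.insert "targeting" "Auto"
    else if PySem.Str.isIn "asin" name_lower || PySem.Str.isIn "product" name_lower then
      result.insert "targeting" "Product"
    else result
  let result :=
    if PySem.Str.isIn "|" campaign_name then
      let parts := ((PySem.Str.split? campaign_name "|").getD []).map PySem.Str.strip
      if 2 ≤ parts.length then
        (result.insert "brand_code" (parts.getD 0 "")).insert "objective" (parts.getD 1 "")
      else result
    else result
  result.items

-- ===== PORT B =====
-- one combined rule table: (group, prefixes, substrings, field, value)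
def pvRules : List (String × List String × List String × String × String) :=
  [("ad", ["sp-"], ["sponsored products"], "ad_type", "SP"),
   ("ad", ["sb-"], ["sponsored brands"], "ad_type", "SB"),
   ("ad", ["sd-"], ["sponsored display"], "ad_type", "SD"),
   ("kw", [], ["exact"], "match_type", "Exact"),
   ("kw", [], ["phrase"], "match_type", "Phrase"),
   ("kw", [], ["broad"], "match_type", "Broad"),
   ("kw", [], ["auto"], "targeting", "Auto"),
   ("kw", [], ["asin", "product"], "targeting", "Product")]

def parse_campaign_name_alt (campaign_name : String) : List (String × String) :=
  let name_lower := if campaign_name ≠ "" then PySem.Str.lower campaign_name else ""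
  -- stage 1: ALL matching rules (no short-circuit), as the comprehension in Source B
  let matched := (pvRules.filter (fun r =>
      r.2.1.any (fun p => PySem.Str.startswith name_lower p) ||
      r.2.2.1.any (fun s => PySem.Str.isIn s name_lower))).map
      (fun r => (r.1, r.2.2.2.1, r.2.2.2.2))
  -- stage 2: back-to-front overwrite, so the first match per group wins
  let winners := matched.reverse.foldl
      (fun (d : PySem.Dict String (String × String)) gfv => d.insert gfv.1 gfv.2)
      (PySem.Dict.ofList [])
  let fields := winners.values.foldl
      (fun (d : PySem.Dict String String) fv => d.insert fv.1 fv.2)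
      (PySem.Dict.ofList
        [("ad_type", ""), ("match_type", ""), ("targeting", ""), ("brand_code", ""), ("objective", "")])
  let fields :=
    if PySem.Str.isIn "|" campaign_name then
      let parts := ((PySem.Str.split? campaign_name "|").getD []).map PySem.Str.strip
      if 2 ≤ parts.length then
        (fields.insert "brand_code" (parts.getD 0 "")).insert "objective" (parts.getD 1 "")
      else fields
    else fields
  fields.items

-- ===== PRECONDITION & SPEC =====
def Spec_parse_campaign_name (campaign_name : String) (out : List (String × String)) : Prop := out = parse_campaign_name_alt campaign_name
instance (campaign_name : String) (out : List (String × String)) : Decidable (Spec_parse_campaign_name campaign_name out) := by unfold Spec_parse_campaign_name; infer_instance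

-- ===== CLAIM (what is proved, stated in full; the proofs are below) =====
def Claim_equal_parse_campaign_name : Prop := ∀ (campaign_name : String), Dom_parse_campaign_name campaign_name → Spec_parse_campaign_name campaign_name (parse_campaign_name campaign_name)

-- ===== LEMMAS AND PROOFS =====

-- ===== VERDICT (by name: the statement is the Claim_ definition above) =====
set_option maxHeartbeats 4000000 in
theorem parse_campaign_name_spec : Claim_equal_parse_campaign_name := by
  intro c _
  unfold Spec_parse_campaign_name
  simp only [parse_campaign_name, parse_campaign_name_alt, pvRules,
    List.filter_cons, List.filter_nil, List.any_cons, List.any_nil,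
    Bool.or_false, Bool.false_or]
  generalize (if c ≠ "" then PySem.Str.lower c else "") = nl
  generalize (PySem.Str.startswith nl "sp-" || PySem.Str.isIn "sponsored products" nl) = b1
  generalize (PySem.Str.startswith nl "sb-" || PySem.Str.isIn "sponsored brands" nl) = b2
  generalize (PySem.Str.startswith nl "sd-" || PySem.Str.isIn "sponsored display" nl) = b3
  generalize (PySem.Str.isIn "asin" nl || PySem.Str.isIn "product" nl) = b8
  generalize PySem.Str.isIn "exact" nl = b4
  generalize PySem.Str.isIn "phrase" nl = b5
  generalize PySem.Str.isIn "broad" nl = b6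
  generalize PySem.Str.isIn "auto" nl = b7
  cases b1 <;> cases b2 <;> cases b3 <;> cases b4 <;> cases b5 <;> cases b6 <;> cases b7 <;> cases b8 <;> rfl
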